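-- pv_equiv track=rewrite | github.com/iqbal-lab-org/varifier | varifier/global_align.py | fix_homopolymer_indels_in_msa
-- ===== SOURCE A (Python) =====
-- ACGT = {"A", "C", "G", "T"}
--
-- def homopolymer_char(ref_seq, qry_seq, i):
--     if ref_seq[i] == qry_seq[i] and ref_seq[i] in ACGT:
--         return ref_seq[i]
--     elif ref_seq[i] == "-" and qry_seq[i] in ACGT:
--         return qry_seq[i]
--     elif qry_seq[i] == "-" and ref_seq[i] in ACGT:
--         return ref_seq[i]
--     else:
--         return None
--
-- def is_homopolymer_block(ref_seq, qry_seq, min_length, start, end=None):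
--     ref_count = len([x for x in ref_seq[start:end] if x in ACGT])
--     qry_count = len([x for x in qry_seq[start:end] if x in ACGT])
--     return (
--         ref_count > 0
--         and qry_count > 0
--         and (ref_count >= min_length or qry_count >= min_length)
--     )
--
-- def find_homopolymer_blocks(ref_seq, qry_seq, min_poly_length):
--     if min_poly_length < 3:
--         raise NotImplementedError(f"min_poly_length must be at least 3")
--
--     blocks = []
--     current_char = homopolymer_char(ref_seq, qry_seq, 0)
--     start = None if current_char is None else 0
--     for i in range(1, len(ref_seq)):
--         new_char = homopolymer_char(ref_seq, qry_seq, i)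
--         if new_char is None or new_char != current_char:
--             if start is not None and is_homopolymer_block(
--                 ref_seq, qry_seq, min_poly_length, start, end=i
--             ):
--                 blocks.append((start, i - 1, current_char))
--
--             start = None if new_char is None else i
--             current_char = new_char
--
--     if start is not None and is_homopolymer_block(
--         ref_seq, qry_seq, min_poly_length, start
--     ):
--         blocks.append((start, len(ref_seq) - 1, current_char))
--
--     return blocks
--
-- def fix_homopolymer_indels_in_msa(ref_seq, qry_seq, min_poly_length):
--     homopolymers = find_homopolymer_blocks(ref_seq, qry_seq, min_poly_length)
--     if len(homopolymers) == 0: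
--         return ref_seq, qry_seq
--
--     new_ref_seq = []
--     new_qry_seq = []
--
--     for i, (start, end, base) in enumerate(homopolymers):
--         if i == 0:
--             to_add_start = 0
--         else:
--             to_add_start = homopolymers[i - 1][1] + 1
--
--         new_ref_seq.extend(ref_seq[to_add_start:start])
--         new_qry_seq.extend(qry_seq[to_add_start:start])
--         homopolymer = [x for x in ref_seq[start : end + 1] if x == base]
--         new_ref_seq.extend(homopolymer)
--         new_qry_seq.extend(homopolymer)
--
--     new_ref_seq.extend(ref_seq[homopolymers[-1][1] + 1 :])
--     new_qry_seq.extend(qry_seq[homopolymers[-1][1] + 1 :])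
--     return new_ref_seq, new_qry_seq
-- ===== SOURCE B (Python) =====
-- # B: single streaming pass fusing block detection with output emission (pending run +
-- # deferred verbatim emission) instead of A's find-all-blocks-then-rebuild two-phase scan.
-- ACGT = {"A", "C", "G", "T"}
--
--
-- def _char_at(ref_seq, qry_seq, i):
--     r, q = ref_seq[i], qry_seq[i]
--     if r == q and r in ACGT:
--         return r
--     if r == "-" and q in ACGT:
--         return q
--     if q == "-" and r in ACGT:
--         return r
--     return None
--
--
-- def _close_run(ref_seq, qry_seq, min_poly_length, run, seg_start, end, out_ref, out_qry):
--     """Emit the pending run (ending just before `end`, None = end of row) if it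
--     qualifies as a homopolymer block; return the new seg_start."""
--     if run is None:
--         return seg_start
--     ch, s = run
--     ref_count = sum(x in ACGT for x in ref_seq[s:end])
--     qry_count = sum(x in ACGT for x in qry_seq[s:end])
--     if ref_count > 0 and qry_count > 0 and (
--         ref_count >= min_poly_length or qry_count >= min_poly_length
--     ):
--         out_ref += ref_seq[seg_start:s]
--         out_qry += qry_seq[seg_start:s]
--         collapsed = [x for x in ref_seq[s:end] if x == ch]
--         out_ref += collapsed
--         out_qry += collapsed
--         return len(ref_seq) if end is None else end
--     return seg_start
--
--
-- def fix_homopolymer_indels_in_msa(ref_seq, qry_seq, min_poly_length):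
--     if min_poly_length < 3:
--         raise NotImplementedError("min_poly_length must be at least 3")
--     out_ref, out_qry = [], []
--     seg_start = 0  # everything before this index has been emitted already
--     c0 = _char_at(ref_seq, qry_seq, 0)
--     run = None if c0 is None else (c0, 0)  # (char, start) of the pending run
--     for i in range(1, len(ref_seq)):
--         c = _char_at(ref_seq, qry_seq, i)
--         if run is None or c != run[0]:
--             seg_start = _close_run(
--                 ref_seq, qry_seq, min_poly_length, run, seg_start, i, out_ref, out_qry
--             )
--             run = None if c is None else (c, i)
--     seg_start = _close_run(
--         ref_seq, qry_seq, min_poly_length, run, seg_start, None, out_ref, out_qry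
--     )
--     out_ref += ref_seq[seg_start:]
--     out_qry += qry_seq[seg_start:]
--     return out_ref, out_qry
-- ===== Notes on version B (the rewrite author's own statement) =====
-- stated objective: alternative
-- what changed: A scans once to collect all homopolymer blocks and then re-walks the alignment indexing back into the block list to rebuild both rows; B is a single streaming pass that maintains the pending run and an emission cursor and emits each gap/collapsed-run pair the moment a run closes, so the block list and the second rebuild pass disappear.
import Mathlib
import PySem

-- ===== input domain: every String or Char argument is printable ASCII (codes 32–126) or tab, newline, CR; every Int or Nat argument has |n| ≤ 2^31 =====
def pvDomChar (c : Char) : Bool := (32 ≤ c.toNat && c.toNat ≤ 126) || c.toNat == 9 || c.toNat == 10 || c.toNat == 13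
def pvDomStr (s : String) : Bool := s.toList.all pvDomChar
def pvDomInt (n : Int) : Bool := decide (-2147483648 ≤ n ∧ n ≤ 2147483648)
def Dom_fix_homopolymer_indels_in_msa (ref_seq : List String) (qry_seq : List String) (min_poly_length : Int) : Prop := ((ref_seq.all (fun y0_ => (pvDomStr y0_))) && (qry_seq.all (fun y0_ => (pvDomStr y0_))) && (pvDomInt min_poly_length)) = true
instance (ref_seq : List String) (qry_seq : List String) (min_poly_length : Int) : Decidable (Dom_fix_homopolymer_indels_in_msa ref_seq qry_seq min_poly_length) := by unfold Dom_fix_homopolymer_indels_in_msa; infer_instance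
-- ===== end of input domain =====

-- B replaces A's find-all-blocks-then-rebuild two-phase scan by one streaming pass that
-- emits each gap / collapsed run as the pending run closes (objective: alternative).

-- ===== PORT A =====
def pvACGT : PySem.Set String := PySem.Set.ofList ["A", "C", "G", "T"]

def pvHChar (ref_seq qry_seq : List String) (i : Int) : Option String :=
  -- ref_seq[i] / qry_seq[i]: none = IndexError (excluded by Pre_)
  match PySem.List.pyGet? ref_seq i, PySem.List.pyGet? qry_seq i with
  | some r, some q =>
      if r = q ∧ pvACGT.contains r then some r
      else if r = "-" ∧ pvACGT.contains q then some q
      else if q = "-" ∧ pvACGT.contains r then some r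
      else none
  | _, _ => none

def pvIsHBlock (ref_seq qry_seq : List String) (min_length start : Int) (end? : Option Int) : Bool :=
  let ref_count : Int := ((PySem.List.slice ref_seq (some start) end?).filter (fun x => pvACGT.contains x)).length
  let qry_count : Int := ((PySem.List.slice qry_seq (some start) end?).filter (fun x => pvACGT.contains x)).length
  decide (ref_count > 0 ∧ qry_count > 0 ∧ (ref_count ≥ min_length ∨ qry_count ≥ min_length))

-- the `for i in range(1, len(ref_seq))` loop of find_homopolymer_blocks, plus the trailing
-- final-block check once the loop is done (j counts up; j < len is the range guard)
def pvFindLoop (ref_seq qry_seq : List String) (min_poly_length : Int) (j : Nat)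
    (blocks : List (Int × Int × Option String)) (current_char : Option String) (start : Option Int) :
    List (Int × Int × Option String) :=
  if j < ref_seq.length then
    let new_char := pvHChar ref_seq qry_seq (j : Int)
    if new_char = none ∨ new_char ≠ current_char then
      let blocks' :=
        match start with
        | some s =>
            if pvIsHBlock ref_seq qry_seq min_poly_length s (some (j : Int)) then
              blocks ++ [(s, (j : Int) - 1, current_char)]
            else blocks
        | none => blocks
      pvFindLoop ref_seq qry_seq min_poly_length (j + 1) blocks' new_char
        (if new_char = none then none else some (j : Int))
    else
      pvFindLoop ref_seq qry_seq min_poly_length (j + 1) blocks current_char start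
  else
    match start with
    | some s =>
        if pvIsHBlock ref_seq qry_seq min_poly_length s none then
          blocks ++ [(s, (ref_seq.length : Int) - 1, current_char)]
        else blocks
    | none => blocks
termination_by ref_seq.length - j

-- the `for i, (start, end, base) in enumerate(homopolymers)` rebuild loop; `to_add`
-- carries homopolymers[i-1][1] + 1 (the previous block's end + 1; 0 for the first block),
-- and the [] case appends the trailing ref_seq[homopolymers[-1][1]+1:] slices
def pvRebuildLoop (ref_seq qry_seq : List String) (bs : List (Int × Int × Option String))
    (to_add : Int) (new_ref new_qry : List String) : List String × List String :=
  match bs with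
  | [] => (new_ref ++ PySem.List.slice ref_seq (some to_add) none,
           new_qry ++ PySem.List.slice qry_seq (some to_add) none)
  | (s, e, base) :: rest =>
      let homopolymer := (PySem.List.slice ref_seq (some s) (some (e + 1))).filter (fun x => some x == base)
      pvRebuildLoop ref_seq qry_seq rest (e + 1)
        (new_ref ++ PySem.List.slice ref_seq (some to_add) (some s) ++ homopolymer)
        (new_qry ++ PySem.List.slice qry_seq (some to_add) (some s) ++ homopolymer)

def fix_homopolymer_indels_in_msa (ref_seq : List String) (qry_seq : List String) (min_poly_length : Int) : List String × List String :=
  -- the min_poly_length < 3 NotImplementedError is excluded by Pre_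
  let current_char := pvHChar ref_seq qry_seq 0
  let homopolymers := pvFindLoop ref_seq qry_seq min_poly_length 1 []
    current_char (if current_char = none then none else some 0)
  if homopolymers.length = 0 then (ref_seq, qry_seq)
  else pvRebuildLoop ref_seq qry_seq homopolymers 0 [] []

-- ===== PORT B =====
def pvCharAt (ref_seq qry_seq : List String) (i : Int) : Option String :=
  -- _char_at of Source B; ref_seq[i] / qry_seq[i]: none = IndexError (excluded by Pre_)
  match PySem.List.pyGet? ref_seq i, PySem.List.pyGet? qry_seq i with
  | some r, some q =>
      if r = q ∧ pvACGT.contains r then some r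
      else if r = "-" ∧ pvACGT.contains q then some q
      else if q = "-" ∧ pvACGT.contains r then some r
      else none
  | _, _ => none

-- _close_run of Source B: emit the pending run if it qualifies; returns (seg_start, out_ref, out_qry)
def pvCloseRun (ref_seq qry_seq : List String) (min_poly_length : Int) (run : Option (String × Int))
    (seg_start : Int) (end? : Option Int) (out_ref out_qry : List String) :
    Int × List String × List String :=
  match run with
  | none => (seg_start, out_ref, out_qry)
  | some (ch, s) =>
      let ref_count : Int := (PySem.List.slice ref_seq (some s) end?).countP (fun x => pvACGT.contains x)
      let qry_count : Int := (PySem.List.slice qry_seq (some s) end?).countP (fun x => pvACGT.contains x)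
      if ref_count > 0 ∧ qry_count > 0 ∧ (ref_count ≥ min_poly_length ∨ qry_count ≥ min_poly_length) then
        let collapsed := (PySem.List.slice ref_seq (some s) end?).filter (fun x => x == ch)
        (match end? with | none => (ref_seq.length : Int) | some e => e,
         out_ref ++ PySem.List.slice ref_seq (some seg_start) (some s) ++ collapsed,
         out_qry ++ PySem.List.slice qry_seq (some seg_start) (some s) ++ collapsed)
      else (seg_start, out_ref, out_qry)

-- the `for i in range(1, len(ref_seq))` loop of Source B, plus the final close and tail emission
def pvStreamLoop (ref_seq qry_seq : List String) (min_poly_length : Int) (j : Nat)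
    (seg_start : Int) (run : Option (String × Int)) (out_ref out_qry : List String) :
    List String × List String :=
  if j < ref_seq.length then
    let c := pvCharAt ref_seq qry_seq (j : Int)
    match run with
    | some (ch, s) =>
        if c = some ch then
          pvStreamLoop ref_seq qry_seq min_poly_length (j + 1) seg_start (some (ch, s)) out_ref out_qry
        else
          let (seg_start', out_ref', out_qry') :=
            pvCloseRun ref_seq qry_seq min_poly_length (some (ch, s)) seg_start (some (j : Int)) out_ref out_qry
          pvStreamLoop ref_seq qry_seq min_poly_length (j + 1) seg_start'
            (match c with | none => none | some c' => some (c', (j : Int))) out_ref' out_qry'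
    | none =>
        pvStreamLoop ref_seq qry_seq min_poly_length (j + 1) seg_start
          (match c with | none => none | some c' => some (c', (j : Int))) out_ref out_qry
  else
    let (seg_start', out_ref', out_qry') :=
      pvCloseRun ref_seq qry_seq min_poly_length run seg_start none out_ref out_qry
    (out_ref' ++ PySem.List.slice ref_seq (some seg_start') none,
     out_qry' ++ PySem.List.slice qry_seq (some seg_start') none)
termination_by ref_seq.length - j

def fix_homopolymer_indels_in_msa_alt (ref_seq : List String) (qry_seq : List String) (min_poly_length : Int) : List String × List String :=
  -- the min_poly_length < 3 NotImplementedError is excluded by Pre_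
  let c0 := pvCharAt ref_seq qry_seq 0
  pvStreamLoop ref_seq qry_seq min_poly_length 1 0
    (match c0 with | none => none | some c => some (c, 0)) [] []

-- ===== PRECONDITION & SPEC =====
-- Pre_ excludes exactly the inputs where the Python A raises: min_poly_length < 3
-- (NotImplementedError), and an empty ref row or a qry row shorter than the ref row
-- (IndexError from ref_seq[i] / qry_seq[i]).
def Pre_fix_homopolymer_indels_in_msa (ref_seq : List String) (qry_seq : List String) (min_poly_length : Int) : Prop :=
  3 ≤ min_poly_length ∧ ref_seq ≠ [] ∧ ref_seq.length ≤ qry_seq.length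
instance (ref_seq : List String) (qry_seq : List String) (min_poly_length : Int) : Decidable (Pre_fix_homopolymer_indels_in_msa ref_seq qry_seq min_poly_length) := by unfold Pre_fix_homopolymer_indels_in_msa; infer_instance

def pvWitness_fix_homopolymer_indels_in_msa : List String × List String × Int :=
  (["A", "A", "-", "A", "C"], ["A", "A", "A", "A", "C"], 3)

def Spec_fix_homopolymer_indels_in_msa (ref_seq : List String) (qry_seq : List String) (min_poly_length : Int) (out : List String × List String) : Prop := out = fix_homopolymer_indels_in_msa_alt ref_seq qry_seq min_poly_length
instance (ref_seq : List String) (qry_seq : List String) (min_poly_length : Int) (out : List String × List String) : Decidable (Spec_fix_homopolymer_indels_in_msa ref_seq qry_seq min_poly_length out) := by unfold Spec_fix_homopolymer_indels_in_msa; infer_instance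

-- ===== CLAIM (what is proved, stated in full; the proofs are below) =====
def Claim_equal_fix_homopolymer_indels_in_msa : Prop := ∀ (ref_seq : List String) (qry_seq : List String) (min_poly_length : Int), Dom_fix_homopolymer_indels_in_msa ref_seq qry_seq min_poly_length → Pre_fix_homopolymer_indels_in_msa ref_seq qry_seq min_poly_length → Spec_fix_homopolymer_indels_in_msa ref_seq qry_seq min_poly_length (fix_homopolymer_indels_in_msa ref_seq qry_seq min_poly_length)

-- ===== LEMMAS AND PROOFS =====

lemma pvFindLoop_acc (ref_seq qry_seq : List String) (m : Int) :
    ∀ (fuel j : Nat), ref_seq.length - j = fuel →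
    ∀ blocks cur start,
    pvFindLoop ref_seq qry_seq m j blocks cur start
      = blocks ++ pvFindLoop ref_seq qry_seq m j [] cur start := by
  intro fuel
  induction fuel with
  | zero =>
    intro j hj blocks cur start
    have h : ¬ j < ref_seq.length := by omega
    conv_lhs => rw [pvFindLoop.eq_def]
    conv_rhs => rw [pvFindLoop.eq_def]
    simp only [if_neg h]
    cases start with
    | none => simp
    | some s =>
      by_cases hq : pvIsHBlock ref_seq qry_seq m s none = true <;> simp [hq]
  | succ fuel ih =>
    intro j hj blocks cur start
    by_cases h : j < ref_seq.length
    case neg =>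
      conv_lhs => rw [pvFindLoop.eq_def]
      conv_rhs => rw [pvFindLoop.eq_def]
      simp only [if_neg h]
      cases start with
    | none => simp
    | some s =>
      by_cases hq : pvIsHBlock ref_seq qry_seq m s none = true <;> simp [hq]
    case pos =>
      conv_lhs => rw [pvFindLoop.eq_def]
      conv_rhs => rw [pvFindLoop.eq_def]
      simp only [if_pos h]
      by_cases hb : pvHChar ref_seq qry_seq (j : Int) = none ∨ pvHChar ref_seq qry_seq (j : Int) ≠ cur
      · simp only [if_pos hb]
        cases start with
        | none =>
          simp only []
          rw [ih (j+1) (by omega), ih (j+1) (by omega) []]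
          try simp
        | some s =>
          simp only []
          by_cases hq : pvIsHBlock ref_seq qry_seq m s (some (j : Int)) = true
          · simp only [if_pos hq]
            rw [ih (j+1) (by omega), ih (j+1) (by omega) ([] ++ [(s, (j:Int) - 1, cur)])]
            try simp
          · simp only [if_neg hq]
            rw [ih (j+1) (by omega), ih (j+1) (by omega) []]
            try simp
      · simp only [if_neg hb]
        rw [ih (j+1) (by omega), ih (j+1) (by omega) []]
        try simp
lemma pvCharAt_eq (ref_seq qry_seq : List String) (i : Int) :
    pvCharAt ref_seq qry_seq i = pvHChar ref_seq qry_seq i := rfl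

lemma slice_len_eq_none {α : Type} (xs : List α) (s : Int) (hs : 0 ≤ s) :
    PySem.List.slice xs (some s) (some (xs.length : Int)) = PySem.List.slice xs (some s) none := by
  rw [PySem.List.slice_toNat xs hs (by positivity), PySem.List.slice_from xs hs]
  exact List.take_of_length_le (by simp)

-- once the scan is past the end: final close + tails = rebuild of the final-check blocks
lemma stream_eq_rebuild_stop (ref_seq qry_seq : List String) (m : Int) (j : Nat)
    (h : ¬ j < ref_seq.length)
    (cur : Option String) (start : Option Int) (run : Option (String × Int))
    (seg_start : Int) (out_ref out_qry : List String)
    (hinv : cur = none ∧ start = none ∧ run = none ∨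
      ∃ (c : String) (s : Nat), cur = some c ∧ start = some (s : Int) ∧ run = some (c, (s : Int))) :
    pvStreamLoop ref_seq qry_seq m j seg_start run out_ref out_qry
      = pvRebuildLoop ref_seq qry_seq (pvFindLoop ref_seq qry_seq m j [] cur start) seg_start out_ref out_qry := by
  conv_lhs => rw [pvStreamLoop.eq_def]
  conv_rhs => rw [pvFindLoop.eq_def]
  simp only [if_neg h]
  rcases hinv with ⟨hc, hs, hr⟩ | ⟨c, s, hc, hs, hr⟩
  · subst hc; subst hs; subst hr
    simp [pvCloseRun, pvRebuildLoop]
  · subst hc; subst hs; subst hr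
    simp only [pvCloseRun, pvIsHBlock, List.countP_eq_length_filter, decide_eq_true_eq]
    split_ifs with hq
    · simp only [pvRebuildLoop, List.nil_append, sub_add_cancel,
        slice_len_eq_none ref_seq (s : Int) (by positivity)]
      simp [List.append_assoc]
    · simp [pvRebuildLoop]

lemma stream_eq_rebuild (ref_seq qry_seq : List String) (m : Int) :
    ∀ (fuel j : Nat), ref_seq.length - j = fuel →
    ∀ (cur : Option String) (start : Option Int) (run : Option (String × Int))
      (seg_start : Int) (out_ref out_qry : List String),
    (cur = none ∧ start = none ∧ run = none ∨
      ∃ (c : String) (s : Nat), cur = some c ∧ start = some (s : Int) ∧ run = some (c, (s : Int))) →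
    pvStreamLoop ref_seq qry_seq m j seg_start run out_ref out_qry
      = pvRebuildLoop ref_seq qry_seq (pvFindLoop ref_seq qry_seq m j [] cur start) seg_start out_ref out_qry := by
  intro fuel
  induction fuel with
  | zero =>
    intro j hj cur start run seg_start out_ref out_qry hinv
    exact stream_eq_rebuild_stop ref_seq qry_seq m j (by omega) cur start run seg_start out_ref out_qry hinv
  | succ fuel ih =>
    intro j hj cur start run seg_start out_ref out_qry hinv
    by_cases h : j < ref_seq.length
    case neg =>
      exact stream_eq_rebuild_stop ref_seq qry_seq m j h cur start run seg_start out_ref out_qry hinv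
    case pos =>
      conv_lhs => rw [pvStreamLoop.eq_def]
      conv_rhs => rw [pvFindLoop.eq_def]
      simp only [if_pos h, pvCharAt_eq]
      rcases hinv with ⟨hc, hs, hr⟩ | ⟨c0, s, hc, hs, hr⟩
      · subst hc; subst hs; subst hr
        simp only []
        have hb : pvHChar ref_seq qry_seq (j : Int) = none ∨ pvHChar ref_seq qry_seq (j : Int) ≠ none := by
          rcases pvHChar ref_seq qry_seq (j : Int) with _ | c <;> simp
        rw [if_pos hb]
        cases hnc : pvHChar ref_seq qry_seq (j : Int) with
        | none =>
          simp only [reduceIte]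
          exact ih (j + 1) (by omega) none none none _ _ _ (Or.inl ⟨rfl, rfl, rfl⟩)
        | some c =>
          simp only [reduceCtorEq, reduceIte]
          exact ih (j + 1) (by omega) (some c) (some (j : Int)) (some (c, (j : Int))) _ _ _
            (Or.inr ⟨c, j, rfl, rfl, rfl⟩)
      · subst hc; subst hs; subst hr
        simp only []
        by_cases hcc : pvHChar ref_seq qry_seq (j : Int) = some c0
        · rw [if_pos hcc]
          have hb : ¬ (pvHChar ref_seq qry_seq (j : Int) = none ∨ pvHChar ref_seq qry_seq (j : Int) ≠ some c0) := by
            simp [hcc]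
          rw [if_neg hb]
          exact ih (j + 1) (by omega) (some c0) (some (s : Int)) (some (c0, (s : Int))) _ _ _
            (Or.inr ⟨c0, s, rfl, rfl, rfl⟩)
        · rw [if_neg hcc]
          have hb : pvHChar ref_seq qry_seq (j : Int) = none ∨ pvHChar ref_seq qry_seq (j : Int) ≠ some c0 := by
            rcases hx : pvHChar ref_seq qry_seq (j : Int) with _ | c <;> simp_all
          rw [if_pos hb]
          cases hnc : pvHChar ref_seq qry_seq (j : Int) with
          | none =>
            simp only [reduceIte, pvCloseRun, pvIsHBlock, List.countP_eq_length_filter,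
              decide_eq_true_eq]
            split_ifs with hq
            · rw [pvFindLoop_acc ref_seq qry_seq m (ref_seq.length - (j+1)) (j+1) rfl]
              simp only [List.nil_append, List.singleton_append, pvRebuildLoop, sub_add_cancel]
              rw [ih (j + 1) (by omega) none none none _ _ _ (Or.inl ⟨rfl, rfl, rfl⟩)]
              simp [List.append_assoc]
            · exact ih (j + 1) (by omega) none none none _ _ _ (Or.inl ⟨rfl, rfl, rfl⟩)
          | some c =>
            simp only [reduceCtorEq, reduceIte, pvCloseRun, pvIsHBlock, List.countP_eq_length_filter,
              decide_eq_true_eq]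
            split_ifs with hq
            · rw [pvFindLoop_acc ref_seq qry_seq m (ref_seq.length - (j+1)) (j+1) rfl]
              simp only [List.nil_append, List.singleton_append, pvRebuildLoop, sub_add_cancel]
              rw [ih (j + 1) (by omega) (some c) (some (j : Int)) (some (c, (j : Int))) _ _ _
                (Or.inr ⟨c, j, rfl, rfl, rfl⟩)]
              simp [List.append_assoc]
            · exact ih (j + 1) (by omega) (some c) (some (j : Int)) (some (c, (j : Int))) _ _ _
                (Or.inr ⟨c, j, rfl, rfl, rfl⟩)
-- ===== VERDICT (by name: the statement is the Claim_ definition above) =====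
theorem fix_homopolymer_indels_in_msa_spec : Claim_equal_fix_homopolymer_indels_in_msa := by
  intro ref_seq qry_seq min_poly_length _dom _pre
  unfold Spec_fix_homopolymer_indels_in_msa
  unfold fix_homopolymer_indels_in_msa fix_homopolymer_indels_in_msa_alt
  rw [pvCharAt_eq]
  have hrw : ∀ (cur : Option String) (start : Option Int) (run : Option (String × Int)),
      (cur = none ∧ start = none ∧ run = none ∨
        ∃ (c : String) (s : Nat), cur = some c ∧ start = some (s : Int) ∧ run = some (c, (s : Int))) →
      pvStreamLoop ref_seq qry_seq min_poly_length 1 0 run [] []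
        = pvRebuildLoop ref_seq qry_seq (pvFindLoop ref_seq qry_seq min_poly_length 1 [] cur start) 0 [] [] :=
    fun cur start run hinv =>
      stream_eq_rebuild ref_seq qry_seq min_poly_length (ref_seq.length - 1) 1 rfl cur start run 0 [] [] hinv
  cases hc0 : pvHChar ref_seq qry_seq 0 with
  | none =>
    simp only [reduceIte]
    rw [hrw none none none (Or.inl ⟨rfl, rfl, rfl⟩)]
    by_cases hz : (pvFindLoop ref_seq qry_seq min_poly_length 1 [] none none).length = 0
    · rw [if_pos hz]
      rw [List.length_eq_zero_iff.mp hz]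
      simp [pvRebuildLoop, PySem.List.slice_none_none]
    · rw [if_neg hz]
  | some c =>
    simp only [reduceCtorEq, reduceIte]
    rw [hrw (some c) (some 0) (some (c, 0)) (Or.inr ⟨c, 0, rfl, by simp, by simp⟩)]
    by_cases hz : (pvFindLoop ref_seq qry_seq min_poly_length 1 [] (some c) (some 0)).length = 0
    · rw [if_pos hz]
      rw [List.length_eq_zero_iff.mp hz]
      simp [pvRebuildLoop, PySem.List.slice_none_none]
    · rw [if_neg hz]
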